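-- pv_equiv track=rewrite | github.com/CDBiddulph/scaffold-learning | experiments/crosswords_20250711_195402/scaffolds/11/scaffold.py | build_solution_grid
-- ===== SOURCE A (Python) =====
-- def build_solution_grid(grid, clue_positions, across_answers, down_answers):
--     """Build the solution grid from the solved clues"""
--     height = len(grid)
--     width = len(grid[0]) if height > 0 else 0
--
--     solution = [['' for _ in range(width)] for _ in range(height)]
--
--     # Copy black squares
--     for row in range(height):
--         for col in range(width):
--             if grid[row][col] == '.':
--                 solution[row][col] = '.'
--
--     # Place across answers
--     for clue_num, answer in across_answers.items():
--         if clue_num in clue_positions: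
--             pos = clue_positions[clue_num]
--             row, col = pos['row'], pos['col']
--             for i, letter in enumerate(answer):
--                 if col + i < width:
--                     solution[row][col + i] = letter
--
--     # Place down answers
--     for clue_num, answer in down_answers.items():
--         if clue_num in clue_positions:
--             pos = clue_positions[clue_num]
--             row, col = pos['row'], pos['col']
--             for i, letter in enumerate(answer):
--                 if row + i < height:
--                     # Only overwrite if empty or same letter
--                     if solution[row + i][col] == '' or solution[row + i][col] == letter:
--                         solution[row + i][col] = letter
--
--     # Fill any remaining empty squares with 'X'
--     for row in range(height):
--         for col in range(width):
--             if solution[row][col] == '':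
--                 solution[row][col] = 'X'
--
--     return solution
-- ===== SOURCE B (Python) =====
-- def build_solution_grid(grid, clue_positions, across_answers, down_answers):
--     """Build the solution grid from the solved clues"""
--     height = len(grid)
--     width = len(grid[0]) if height > 0 else 0
--
--     # Letter tables keyed by cell: across = last write wins, down = first write wins.
--     across = {}
--     for clue_num, answer in across_answers.items():
--         pos = clue_positions.get(clue_num)
--         if pos is None:
--             continue
--         row, col = pos['row'], pos['col']
--         for i, letter in enumerate(answer):
--             if col + i < width:
--                 across[(row, col + i)] = letter
--
--     down = {}
--     for clue_num, answer in down_answers.items():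
--         pos = clue_positions.get(clue_num)
--         if pos is None:
--             continue
--         row, col = pos['row'], pos['col']
--         for i, letter in enumerate(answer):
--             if row + i < height:
--                 down.setdefault((row + i, col), letter)
--
--     # Single pass over the cells: black square, then across letter, then a down
--     # letter only where the cell is still empty, then 'X' for anything left.
--     result = []
--     for r in range(height):
--         row_out = []
--         for c in range(width):
--             cell = '.' if grid[r][c] == '.' else ''
--             cell = across.get((r, c), cell)
--             if cell == '':
--                 cell = down.get((r, c), '')
--             row_out.append(cell if cell != '' else 'X')
--         result.append(row_out)
--     return result
-- ===== Notes on version B (the rewrite author's own statement) =====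
-- stated objective: alternative
-- what changed: A mutates a 2D grid through four sequential passes (blacks, across writes, conditional down writes, X-fill); B instead precomputes two cell-keyed letter dictionaries (across: last write wins; down: first write wins, via setdefault) and builds the result in a single non-mutating pass over the cells.
import Mathlib
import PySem

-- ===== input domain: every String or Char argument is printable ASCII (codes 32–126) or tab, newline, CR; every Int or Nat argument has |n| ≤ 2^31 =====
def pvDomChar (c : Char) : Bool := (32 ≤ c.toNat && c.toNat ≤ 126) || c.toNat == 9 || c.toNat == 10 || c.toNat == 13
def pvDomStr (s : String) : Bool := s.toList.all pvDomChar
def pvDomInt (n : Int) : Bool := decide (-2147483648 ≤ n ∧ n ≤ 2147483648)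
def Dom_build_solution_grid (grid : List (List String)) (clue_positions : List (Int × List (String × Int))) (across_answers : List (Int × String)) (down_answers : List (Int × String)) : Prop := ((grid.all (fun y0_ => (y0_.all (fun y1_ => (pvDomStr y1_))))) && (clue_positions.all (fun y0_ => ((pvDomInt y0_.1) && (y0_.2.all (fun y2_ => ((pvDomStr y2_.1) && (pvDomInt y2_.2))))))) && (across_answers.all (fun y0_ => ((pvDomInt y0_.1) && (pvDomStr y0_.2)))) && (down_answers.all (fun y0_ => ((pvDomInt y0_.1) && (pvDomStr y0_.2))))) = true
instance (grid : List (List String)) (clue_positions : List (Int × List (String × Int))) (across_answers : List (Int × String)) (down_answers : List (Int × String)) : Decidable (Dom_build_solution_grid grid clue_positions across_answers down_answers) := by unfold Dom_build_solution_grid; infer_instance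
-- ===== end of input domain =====

-- B replaces A's four sequential mutating passes over the grid by two precomputed
-- letter tables (across: last write wins; down: first write wins) and one single
-- pass over the cells (objective: alternative decomposition, same cost).
-- A mutates no argument; the equivalence is about the return value.

-- ===== PORT A =====
-- solution[r][c] read/write (Python indexing; total forms used under Pre_, where every
-- index that is actually accessed is in range)
def pvGet2 (sol : List (List String)) (r c : Int) : String :=
  PySem.List.pyGetD (PySem.List.pyGetD sol r []) c ""

def pvSet2 (sol : List (List String)) (r c : Int) (v : String) : List (List String) :=
  PySem.List.pySetD sol r (PySem.List.pySetD (PySem.List.pyGetD sol r []) c v)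

-- body of `for i, letter in enumerate(answer): if col + i < width: solution[row][col+i] = letter`
def pvAcrossInner (W row col : Int) (sol : List (List String)) (il : Int × Char) : List (List String) :=
  if col + il.1 < W then pvSet2 sol row (col + il.1) (String.singleton il.2) else sol

-- one iteration of `for clue_num, answer in across_answers.items()`
-- (pos['row'] / pos['col'] ported as get? with default 0: Pre_ excludes the KeyError case)
def pvAcrossStep (cps : List (Int × List (String × Int))) (W : Int)
    (sol : List (List String)) (p : Int × String) : List (List String) :=
  match (PySem.Dict.mk cps).get? p.1 with
  | none => sol
  | some pos =>
    (PySem.List.enumerate p.2.toList).foldl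
      (pvAcrossInner W (((PySem.Dict.mk pos).get? "row").getD 0) (((PySem.Dict.mk pos).get? "col").getD 0)) sol

-- body of the down inner loop, with the only-overwrite-if-empty-or-equal test
def pvDownInner (H row col : Int) (sol : List (List String)) (il : Int × Char) : List (List String) :=
  if row + il.1 < H then
    if pvGet2 sol (row + il.1) col = "" ∨ pvGet2 sol (row + il.1) col = String.singleton il.2 then
      pvSet2 sol (row + il.1) col (String.singleton il.2)
    else sol
  else sol

def pvDownStep (cps : List (Int × List (String × Int))) (H : Int)
    (sol : List (List String)) (p : Int × String) : List (List String) :=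
  match (PySem.Dict.mk cps).get? p.1 with
  | none => sol
  | some pos =>
    (PySem.List.enumerate p.2.toList).foldl
      (pvDownInner H (((PySem.Dict.mk pos).get? "row").getD 0) (((PySem.Dict.mk pos).get? "col").getD 0)) sol

def build_solution_grid (grid : List (List String)) (clue_positions : List (Int × List (String × Int))) (across_answers : List (Int × String)) (down_answers : List (Int × String)) : List (List String) :=
  let height := grid.length
  let width := if height > 0 then (grid.headD []).length else 0
  let sol0 := List.replicate height (List.replicate width "")
  -- Copy black squares
  let sol1 := (List.range height).foldl (fun s (row : Nat) =>
    (List.range width).foldl (fun s (col : Nat) =>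
      if pvGet2 grid (row : Int) (col : Int) = "." then pvSet2 s (row : Int) (col : Int) "." else s) s) sol0
  -- Place across answers
  let sol2 := across_answers.foldl (pvAcrossStep clue_positions (width : Int)) sol1
  -- Place down answers
  let sol3 := down_answers.foldl (pvDownStep clue_positions (height : Int)) sol2
  -- Fill any remaining empty squares with 'X'
  (List.range height).foldl (fun s (row : Nat) =>
    (List.range width).foldl (fun s (col : Nat) =>
      if pvGet2 s (row : Int) (col : Int) = "" then pvSet2 s (row : Int) (col : Int) "X" else s) s) sol3

-- ===== PORT B =====
-- across table: cell ↦ letter, later writes overwrite (dict assignment)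
def pvBAcrossInner (W row col : Int) (d : PySem.Dict (Int × Int) String) (il : Int × Char) : PySem.Dict (Int × Int) String :=
  if col + il.1 < W then d.insert (row, col + il.1) (String.singleton il.2) else d

def pvBAcrossStep (cps : List (Int × List (String × Int))) (W : Int)
    (d : PySem.Dict (Int × Int) String) (p : Int × String) : PySem.Dict (Int × Int) String :=
  match (PySem.Dict.mk cps).get? p.1 with
  | none => d
  | some pos =>
    (PySem.List.enumerate p.2.toList).foldl
      (pvBAcrossInner W (((PySem.Dict.mk pos).get? "row").getD 0) (((PySem.Dict.mk pos).get? "col").getD 0)) d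

-- down table: cell ↦ letter, first write wins (dict.setdefault)
def pvBDownInner (H row col : Int) (d : PySem.Dict (Int × Int) String) (il : Int × Char) : PySem.Dict (Int × Int) String :=
  if row + il.1 < H then d.setdefault (row + il.1, col) (String.singleton il.2) else d

def pvBDownStep (cps : List (Int × List (String × Int))) (H : Int)
    (d : PySem.Dict (Int × Int) String) (p : Int × String) : PySem.Dict (Int × Int) String :=
  match (PySem.Dict.mk cps).get? p.1 with
  | none => d
  | some pos =>
    (PySem.List.enumerate p.2.toList).foldl
      (pvBDownInner H (((PySem.Dict.mk pos).get? "row").getD 0) (((PySem.Dict.mk pos).get? "col").getD 0)) d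

def build_solution_grid_alt (grid : List (List String)) (clue_positions : List (Int × List (String × Int))) (across_answers : List (Int × String)) (down_answers : List (Int × String)) : List (List String) :=
  let height := grid.length
  let width := if height > 0 then (grid.headD []).length else 0
  let across := across_answers.foldl (pvBAcrossStep clue_positions (width : Int)) PySem.Dict.empty
  let down := down_answers.foldl (pvBDownStep clue_positions (height : Int)) PySem.Dict.empty
  (List.range height).map fun r =>
    (List.range width).map fun c =>
      let cell := if (grid.getD r []).getD c "" = "." then "." else ""
      let cell1 := (across.get? ((r : Int), (c : Int))).getD cell
      let cell2 := if cell1 = "" then (down.get? ((r : Int), (c : Int))).getD "" else cell1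
      if cell2 = "" then "X" else cell2

-- ===== PRECONDITION & SPEC =====
-- Per-clue geometric sanity for a referenced answer: position has 'row'/'col' and, when the
-- answer is nonempty and not entirely clipped away, its start is inside the grid.
def pvPreClue (cps : List (Int × List (String × Int))) (H W : Int) (isAcross : Bool) (p : Int × String) : Bool :=
  match (PySem.Dict.mk cps).get? p.1 with
  | none => true
  | some pos =>
    match (PySem.Dict.mk pos).get? "row", (PySem.Dict.mk pos).get? "col" with
    | some r, some c =>
      decide (p.2 = "") ||
        (if isAcross then (decide (W ≤ c) || decide (0 ≤ r ∧ r < H ∧ 0 ≤ c))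
         else (decide (H ≤ r) || decide (0 ≤ r ∧ 0 ≤ c ∧ c < W)))
    | _, _ => false

-- Pre_ excludes ragged grids and referenced clue positions with missing 'row'/'col' keys or
-- out-of-grid start coordinates (for answers that are not clipped away entirely), on which
-- Python A raises KeyError/IndexError or silently wraps negative indices into the grid.
def Pre_build_solution_grid (grid : List (List String)) (clue_positions : List (Int × List (String × Int))) (across_answers : List (Int × String)) (down_answers : List (Int × String)) : Prop :=
  (∀ row ∈ grid, (grid.headD []).length ≤ row.length) ∧
  (∀ p ∈ across_answers, pvPreClue clue_positions (grid.length : Int) ((grid.headD []).length : Int) true p = true) ∧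
  (∀ p ∈ down_answers, pvPreClue clue_positions (grid.length : Int) ((grid.headD []).length : Int) false p = true)

instance (grid : List (List String)) (clue_positions : List (Int × List (String × Int))) (across_answers : List (Int × String)) (down_answers : List (Int × String)) : Decidable (Pre_build_solution_grid grid clue_positions across_answers down_answers) := by unfold Pre_build_solution_grid; infer_instance

def pvWitness_build_solution_grid : List (List String) × (List (Int × List (String × Int))) × (List (Int × String)) × (List (Int × String)) :=
  ([["A", "."], [".", "B"]], [(1, [("row", 0), ("col", 0)])], [(1, "CD")], [(1, "CE")])

def Spec_build_solution_grid (grid : List (List String)) (clue_positions : List (Int × List (String × Int))) (across_answers : List (Int × String)) (down_answers : List (Int × String)) (out : List (List String)) : Prop := out = build_solution_grid_alt grid clue_positions across_answers down_answers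
instance (grid : List (List String)) (clue_positions : List (Int × List (String × Int))) (across_answers : List (Int × String)) (down_answers : List (Int × String)) (out : List (List String)) : Decidable (Spec_build_solution_grid grid clue_positions across_answers down_answers out) := by unfold Spec_build_solution_grid; infer_instance

-- ===== CLAIM (what is proved, stated in full; the proofs are below) =====
def Claim_equal_build_solution_grid : Prop := ∀ (grid : List (List String)) (clue_positions : List (Int × List (String × Int))) (across_answers : List (Int × String)) (down_answers : List (Int × String)), Dom_build_solution_grid grid clue_positions across_answers down_answers → Pre_build_solution_grid grid clue_positions across_answers down_answers → Spec_build_solution_grid grid clue_positions across_answers down_answers (build_solution_grid grid clue_positions across_answers down_answers)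

-- ===== LEMMAS AND PROOFS =====

theorem pvWitness_ok : Dom_build_solution_grid (pvWitness_build_solution_grid.1) (pvWitness_build_solution_grid.2.1) (pvWitness_build_solution_grid.2.2.1) (pvWitness_build_solution_grid.2.2.2) ∧ Pre_build_solution_grid (pvWitness_build_solution_grid.1) (pvWitness_build_solution_grid.2.1) (pvWitness_build_solution_grid.2.2.1) (pvWitness_build_solution_grid.2.2.2) := by
  decide

-- shape invariant: h rows of width w
def pvDims (sol : List (List String)) (h w : Nat) : Prop :=
  sol.length = h ∧ ∀ row ∈ sol, row.length = w

-- the per-answer write map of one across answer: the letter the answer puts at cell k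
-- (clipping `col + i < width` is implied at the cells k.2 < width where we read it)
def pvAW (row b : Int) (ls : List Char) (k : Int × Int) : Option String :=
  if k.1 = row ∧ b ≤ k.2 ∧ k.2 < b + ls.length then
    (ls[(k.2 - b).toNat]?).map String.singleton
  else none

-- the per-answer write map of one down answer
def pvDW (b col : Int) (ls : List Char) (k : Int × Int) : Option String :=
  if k.2 = col ∧ b ≤ k.1 ∧ k.1 < b + ls.length then
    (ls[(k.1 - b).toNat]?).map String.singleton
  else none

def pvW1 (cps : List (Int × List (String × Int))) (p : Int × String) (k : Int × Int) : Option String :=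
  match (PySem.Dict.mk cps).get? p.1 with
  | none => none
  | some pos => pvAW (((PySem.Dict.mk pos).get? "row").getD 0) (((PySem.Dict.mk pos).get? "col").getD 0) p.2.toList k

def pvW1D (cps : List (Int × List (String × Int))) (p : Int × String) (k : Int × Int) : Option String :=
  match (PySem.Dict.mk cps).get? p.1 with
  | none => none
  | some pos => pvDW (((PySem.Dict.mk pos).get? "row").getD 0) (((PySem.Dict.mk pos).get? "col").getD 0) p.2.toList k

-- the across letter table as a function: last answer wins
def pvWA (cps : List (Int × List (String × Int))) (aa : List (Int × String)) (k : Int × Int) : Option String :=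
  match aa with
  | [] => none
  | x :: l => (pvWA cps l k).or (pvW1 cps x k)

-- the down letter table as a function: first answer wins
def pvWD (cps : List (Int × List (String × Int))) (da : List (Int × String)) (k : Int × Int) : Option String :=
  match da with
  | [] => none
  | x :: l => (pvW1D cps x k).or (pvWD cps l k)

theorem pvSingleton_ne_empty (c : Char) : String.singleton c ≠ "" := by
  simp [String.singleton]

theorem pvAW_nil (row b : Int) (k : Int × Int) : pvAW row b [] k = none := by
  unfold pvAW
  rw [if_neg]
  rintro ⟨-, h1, h2⟩
  simp only [List.length_nil, Nat.cast_zero, add_zero] at h2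
  omega

theorem pvDW_nil (b col : Int) (k : Int × Int) : pvDW b col [] k = none := by
  unfold pvDW
  rw [if_neg]
  rintro ⟨-, h1, h2⟩
  simp only [List.length_nil, Nat.cast_zero, add_zero] at h2
  omega

theorem pvAW_cons (row b : Int) (ch : Char) (t : List Char) (k : Int × Int) :
    pvAW row b (ch :: t) k =
      if k.1 = row ∧ k.2 = b then some (String.singleton ch) else pvAW row (b + 1) t k := by
  obtain ⟨a, c⟩ := k
  by_cases ha : a = row
  · simp only [pvAW, List.length_cons, ha, true_and]
    push_cast
    split_ifs with h1 h2 h3 <;> try (exfalso; omega)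
    · have hc : c = b := h2
      have : (c - b).toNat = 0 := by omega
      rw [this]
      simp
    · have : (c - b).toNat = (c - (b + 1)).toNat + 1 := by omega
      rw [this]
      simp
    · rfl
  · simp [pvAW, ha]

theorem pvDW_cons (b col : Int) (ch : Char) (t : List Char) (k : Int × Int) :
    pvDW b col (ch :: t) k =
      if k.2 = col ∧ k.1 = b then some (String.singleton ch) else pvDW (b + 1) col t k := by
  obtain ⟨a, c⟩ := k
  by_cases hc : c = col
  · simp only [pvDW, List.length_cons, hc, true_and]
    push_cast
    split_ifs with h1 h2 h3 <;> try (exfalso; omega)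
    · have : (a - b).toNat = 0 := by omega
      rw [this]
      simp
    · have : (a - b).toNat = (a - (b + 1)).toNat + 1 := by omega
      rw [this]
      simp
    · rfl
  · simp [pvDW, hc]

theorem pvDW_ne_empty {b col ls k s} (h : pvDW b col ls k = some s) : s ≠ "" := by
  unfold pvDW at h
  split at h
  · obtain ⟨ch, -, rfl⟩ := Option.map_eq_some_iff.mp h
    exact pvSingleton_ne_empty ch
  · exact absurd h (by simp)

theorem pvW1D_ne_empty {cps p k s} (h : pvW1D cps p k = some s) : s ≠ "" := by
  unfold pvW1D at h
  split at h
  · exact absurd h (by simp)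
  · exact pvDW_ne_empty h

-- pvSet2 keeps the shape
theorem pvDims_pvSet2 {sol h w} (hd : pvDims sol h w) (r c : Int) (hr : 0 ≤ r) (v : String) :
    pvDims (pvSet2 sol r c v) h w := by
  obtain ⟨hl, hrows⟩ := hd
  unfold pvSet2
  rw [PySem.List.pySetD_of_nonneg _ _ hr]
  by_cases hlt : r.toNat < sol.length
  · refine ⟨by simpa using hl, ?_⟩
    intro row hmem
    rcases List.mem_or_eq_of_mem_set hmem with hm | rfl
    · exact hrows row hm
    · rw [PySem.List.length_pySetD, PySem.List.pyGetD_eq_getElem _ _ hr (by omega)]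
      exact hrows _ (List.getElem_mem hlt)
  · rw [List.set_eq_of_length_le (by omega)]
    exact ⟨hl, hrows⟩

-- total evaluation of a cell read at nonnegative indices
theorem pvGet2_eval (sol : List (List String)) (r c : Int) (h5 : 0 ≤ r) (h7 : 0 ≤ c) :
    pvGet2 sol r c = (sol.getD r.toNat []).getD c.toNat "" := by
  unfold pvGet2
  rw [show r = ((r.toNat : Nat) : Int) by omega, show c = ((c.toNat : Nat) : Int) by omega]
  simp only [PySem.List.pyGetD_natCast]
  have : (max r 0).toNat = r.toNat := by omega
  have : (max c 0).toNat = c.toNat := by omega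
  simp_all

-- reading after a well-placed write
theorem pvGet2_pvSet2 {sol : List (List String)} {h w : Nat} (hd : pvDims sol h w)
    {ri ci r c : Int} (v : String)
    (h1 : 0 ≤ ri) (h2 : ri < (h : Int)) (h3 : 0 ≤ ci) (h4 : ci < (w : Int))
    (h5 : 0 ≤ r) (h6 : r < (h : Int)) (h7 : 0 ≤ c) (h8 : c < (w : Int)) :
    pvGet2 (pvSet2 sol ri ci v) r c = if ri = r ∧ ci = c then v else pvGet2 sol r c := by
  obtain ⟨hl, hrows⟩ := hd
  have hriN : ri.toNat < sol.length := by omega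
  have hriw : (sol[ri.toNat]).length = w := hrows _ (List.getElem_mem hriN)
  rw [pvGet2_eval _ r c h5 h7, pvGet2_eval sol r c h5 h7]
  unfold pvSet2
  rw [PySem.List.pySetD_of_nonneg _ _ h1, PySem.List.pySetD_of_nonneg _ _ h3,
      PySem.List.pyGetD_eq_getElem _ _ h1 (by omega)]
  simp only [List.getD_eq_getElem?_getD]
  rw [List.getElem?_set]
  by_cases hR : ri.toNat = r.toNat
  · have hRR : ri = r := by omega
    subst hRR
    rw [if_pos hR, if_pos hriN]
    simp only [Option.getD_some]
    rw [List.getElem?_set]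
    by_cases hC : ci.toNat = c.toNat
    · have hCC : ci = c := by omega
      subst hCC
      rw [if_pos hC, if_pos (by omega)]
      simp
    · have hCne : ci ≠ c := by omega
      rw [if_neg hC, if_neg (by simp [hCne]), List.getElem?_eq_getElem hriN]
      rfl
  · have hne : ¬(ri = r ∧ ci = c) := by rintro ⟨rfl, -⟩; omega
    rw [if_neg hR, if_neg hne]

-- ----- the two sweep passes of A (black squares, X fill) -----

theorem pvSweepRow {h w : Nat} (F : List (List String) → Nat → Nat → List (List String))
    (φ : Nat → Nat → String → String) (i : Nat) (hi : i < h)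
    (hF : ∀ S j, j < w → pvDims S h w →
      pvDims (F S i j) h w ∧
      ∀ r c : Nat, r < h → c < w →
        pvGet2 (F S i j) (r : Int) (c : Int) =
          if i = r ∧ j = c then φ r c (pvGet2 S (r : Int) (c : Int)) else pvGet2 S (r : Int) (c : Int)) :
    ∀ (js : List Nat), (∀ j ∈ js, j < w) → js.Nodup → ∀ S, pvDims S h w →
      pvDims (js.foldl (fun s j => F s i j) S) h w ∧
      ∀ r c : Nat, r < h → c < w →
        pvGet2 (js.foldl (fun s j => F s i j) S) (r : Int) (c : Int) =
          if i = r ∧ c ∈ js then φ r c (pvGet2 S (r : Int) (c : Int)) else pvGet2 S (r : Int) (c : Int) := by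
  intro js
  induction js with
  | nil =>
    intro _ _ S hS
    exact ⟨hS, by intro r c hr hc; simp⟩
  | cons j t ih =>
    intro hjs hnd S hS
    obtain ⟨hdF, hgF⟩ := hF S j (hjs j (by simp)) hS
    obtain ⟨ihd, ihg⟩ := ih (fun x hx => hjs x (by simp [hx])) (List.Nodup.of_cons hnd) (F S i j) hdF
    have hjnot : j ∉ t := (List.nodup_cons.mp hnd).1
    refine ⟨by simpa using ihd, ?_⟩
    intro r c hr hc
    simp only [List.foldl_cons]
    rw [ihg r c hr hc, hgF r c hr hc]
    by_cases hir : i = r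
    · subst hir
      by_cases hcj : j = c
      · subst hcj
        simp [hjnot]
      · by_cases hcm : c ∈ t
        · simp [hcm, hcj]
        · simp [hcm, hcj, Ne.symm hcj]
    · simp [hir]

theorem pvSweep {h w : Nat} (F : List (List String) → Nat → Nat → List (List String))
    (φ : Nat → Nat → String → String)
    (hF : ∀ S i j, i < h → j < w → pvDims S h w →
      pvDims (F S i j) h w ∧
      ∀ r c : Nat, r < h → c < w →
        pvGet2 (F S i j) (r : Int) (c : Int) =
          if i = r ∧ j = c then φ r c (pvGet2 S (r : Int) (c : Int)) else pvGet2 S (r : Int) (c : Int)) :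
    ∀ S, pvDims S h w →
      pvDims ((List.range h).foldl (fun s i => (List.range w).foldl (fun s j => F s i j) s) S) h w ∧
      ∀ r c : Nat, r < h → c < w →
        pvGet2 ((List.range h).foldl (fun s i => (List.range w).foldl (fun s j => F s i j) s) S) (r : Int) (c : Int) =
          φ r c (pvGet2 S (r : Int) (c : Int)) := by
  have row : ∀ i, i < h → ∀ S, pvDims S h w →
      pvDims ((List.range w).foldl (fun s j => F s i j) S) h w ∧
      ∀ r c : Nat, r < h → c < w →
        pvGet2 ((List.range w).foldl (fun s j => F s i j) S) (r : Int) (c : Int) =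
          if i = r then φ r c (pvGet2 S (r : Int) (c : Int)) else pvGet2 S (r : Int) (c : Int) := by
    intro i hi S hS
    obtain ⟨d2, g2⟩ := pvSweepRow F φ i hi (fun S j hj hS => hF S i j hi hj hS)
      (List.range w) (fun j hj => List.mem_range.mp hj) (List.nodup_range) S hS
    refine ⟨d2, ?_⟩
    intro r c hr hc
    rw [g2 r c hr hc]
    simp [List.mem_range, hc]
  have outer : ∀ (il : List Nat), (∀ i ∈ il, i < h) → il.Nodup → ∀ S, pvDims S h w →
      pvDims (il.foldl (fun s i => (List.range w).foldl (fun s j => F s i j) s) S) h w ∧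
      ∀ r c : Nat, r < h → c < w →
        pvGet2 (il.foldl (fun s i => (List.range w).foldl (fun s j => F s i j) s) S) (r : Int) (c : Int) =
          if r ∈ il then φ r c (pvGet2 S (r : Int) (c : Int)) else pvGet2 S (r : Int) (c : Int) := by
    intro il
    induction il with
    | nil =>
      intro _ _ S hS
      exact ⟨hS, by intro r c hr hc; simp⟩
    | cons i t ih =>
      intro hmem hnd S hS
      obtain ⟨d1, g1⟩ := row i (hmem i (by simp)) S hS
      obtain ⟨d2, g2⟩ := ih (fun x hx => hmem x (by simp [hx])) (List.Nodup.of_cons hnd) _ d1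
      have hinot : i ∉ t := (List.nodup_cons.mp hnd).1
      refine ⟨by simpa using d2, ?_⟩
      intro r c hr hc
      simp only [List.foldl_cons]
      rw [g2 r c hr hc, g1 r c hr hc]
      by_cases hir : i = r
      · subst hir
        simp [hinot]
      · by_cases hrm : r ∈ t
        · simp [hrm, hir]
        · simp [hrm, hir, Ne.symm hir]
  intro S hS
  obtain ⟨d, g⟩ := outer (List.range h) (fun i hi => List.mem_range.mp hi) (List.nodup_range) S hS
  refine ⟨d, ?_⟩
  intro r c hr hc
  rw [g r c hr hc]
  simp [List.mem_range, hr]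

-- ----- A's across pass, pointwise -----

theorem pvInnerA_spec {h w : Nat} (row col : Int) (ls : List Char) :
    ∀ (s b : Int), b = col + s → 0 ≤ s →
      ((0 ≤ row ∧ row < (h : Int) ∧ 0 ≤ b) ∨ (w : Int) ≤ b) →
      ∀ S, pvDims S h w →
        pvDims ((PySem.List.enumerate ls s).foldl (pvAcrossInner (w : Int) row col) S) h w ∧
        ∀ r c : Int, 0 ≤ r → r < (h : Int) → 0 ≤ c → c < (w : Int) →
          pvGet2 ((PySem.List.enumerate ls s).foldl (pvAcrossInner (w : Int) row col) S) r c =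
            (pvAW row b ls (r, c)).getD (pvGet2 S r c) := by
  induction ls with
  | nil =>
    intro s b hb hs hbd S hS
    refine ⟨by simpa only [PySem.List.enumerate_nil, List.foldl_nil] using hS, ?_⟩
    intro r c h5 h6 h7 h8
    simp only [PySem.List.enumerate_nil, List.foldl_nil, pvAW_nil, Option.getD_none]
  | cons ch t ih =>
    intro s b hb hs hbd S hS
    simp only [PySem.List.enumerate_cons, List.foldl_cons]
    have hstep : pvAcrossInner (w : Int) row col S (s, ch) =
        if b < (w : Int) then pvSet2 S row b (String.singleton ch) else S := by
      simp only [pvAcrossInner]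
      rw [show col + (s, ch).1 = b by simp; omega]
    by_cases hg : b < (w : Int)
    · have hbL : 0 ≤ row ∧ row < (h : Int) ∧ 0 ≤ b := by
        rcases hbd with hbd | hbd
        · exact hbd
        · omega
      obtain ⟨hr0, hrh, hb0⟩ := hbL
      rw [hstep, if_pos hg]
      have hSd := pvDims_pvSet2 hS row b hr0 (String.singleton ch)
      obtain ⟨ihd, ihg⟩ := ih (s+1) (b+1) (by omega) (by omega)
        (Or.inl ⟨hr0, hrh, by omega⟩) _ hSd
      refine ⟨ihd, ?_⟩
      intro r c h5 h6 h7 h8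
      rw [ihg r c h5 h6 h7 h8, pvAW_cons,
          pvGet2_pvSet2 hS (String.singleton ch) hr0 hrh hb0 hg h5 h6 h7 h8]
      by_cases hk : r = row ∧ c = b
      · have hnone : pvAW row (b+1) t (r, c) = none := by
          unfold pvAW; rw [if_neg]; rintro ⟨-, h1, -⟩; simp at h1; omega
        rw [hnone]
        simp [hk.1, hk.2]
      · have hk1 : ¬((r, c).1 = row ∧ (r, c).2 = b) := by simpa using hk
        have hk2 : ¬(row = r ∧ b = c) := fun ⟨a1, a2⟩ => hk ⟨a1.symm, a2.symm⟩
        rw [if_neg hk1, if_neg hk2]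
    · rw [hstep, if_neg hg]
      obtain ⟨ihd, ihg⟩ := ih (s+1) (b+1) (by omega) (by omega) (Or.inr (by omega)) S hS
      refine ⟨ihd, ?_⟩
      intro r c h5 h6 h7 h8
      rw [ihg r c h5 h6 h7 h8, pvAW_cons]
      have hk1 : ¬((r, c).1 = row ∧ (r, c).2 = b) := by
        rintro ⟨-, h1⟩; simp at h1; omega
      rw [if_neg hk1]

theorem pvAcrossStep_spec {h w : Nat} (cps : List (Int × List (String × Int))) (p : Int × String)
    (hp : pvPreClue cps (h : Int) (w : Int) true p = true) :
    ∀ S, pvDims S h w →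
      pvDims (pvAcrossStep cps (w : Int) S p) h w ∧
      ∀ r c : Int, 0 ≤ r → r < (h : Int) → 0 ≤ c → c < (w : Int) →
        pvGet2 (pvAcrossStep cps (w : Int) S p) r c = (pvW1 cps p (r, c)).getD (pvGet2 S r c) := by
  intro S hS
  unfold pvAcrossStep pvW1
  unfold pvPreClue at hp
  cases hA : (PySem.Dict.mk cps).get? p.1 with
  | none =>
    simp only [hA]
    exact ⟨hS, fun r c _ _ _ _ => rfl⟩
  | some pos =>
    simp only [hA] at hp
    cases hR : (PySem.Dict.mk pos).get? "row" with
    | none =>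
      cases hC : (PySem.Dict.mk pos).get? "col" with
      | none => simp [hR, hC] at hp
      | some c0 => simp [hR, hC] at hp
    | some r0 =>
    cases hC : (PySem.Dict.mk pos).get? "col" with
    | none => simp [hR, hC] at hp
    | some c0 =>
    simp only [hR, hC] at hp
    simp only [hA, hR, hC, Option.getD_some]
    by_cases hemp : p.2 = ""
    · rw [hemp]
      simp only [String.toList_empty, PySem.List.enumerate_nil, List.foldl_nil]
      refine ⟨hS, ?_⟩
      intro r c h5 h6 h7 h8
      rw [pvAW_nil]
      rfl
    · have hb : (0 ≤ r0 ∧ r0 < (h : Int) ∧ 0 ≤ c0) ∨ (w : Int) ≤ c0 := by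
        simp only [hemp, decide_false, Bool.false_or, if_true, Bool.or_eq_true,
          decide_eq_true_eq] at hp
        rcases hp with hp | hp
        · exact Or.inr hp
        · exact Or.inl hp
      exact pvInnerA_spec r0 c0 p.2.toList 0 c0 (by omega) le_rfl hb S hS

theorem pvAcrossPass_spec {h w : Nat} (cps : List (Int × List (String × Int))) (aa : List (Int × String))
    (hpre : ∀ p ∈ aa, pvPreClue cps (h : Int) (w : Int) true p = true) :
    ∀ S, pvDims S h w →
      pvDims (aa.foldl (pvAcrossStep cps (w : Int)) S) h w ∧
      ∀ r c : Int, 0 ≤ r → r < (h : Int) → 0 ≤ c → c < (w : Int) →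
        pvGet2 (aa.foldl (pvAcrossStep cps (w : Int)) S) r c = (pvWA cps aa (r, c)).getD (pvGet2 S r c) := by
  revert hpre
  induction aa with
  | nil =>
    intro _ S hS
    exact ⟨hS, fun r c _ _ _ _ => rfl⟩
  | cons x l ih =>
    intro hpre S hS
    obtain ⟨sd, sg⟩ := pvAcrossStep_spec cps x (hpre x (by simp)) S hS
    obtain ⟨id2, ig⟩ := ih (fun p hp => hpre p (by simp [hp])) _ sd
    refine ⟨id2, ?_⟩
    intro r c h5 h6 h7 h8
    simp only [List.foldl_cons]
    rw [ig r c h5 h6 h7 h8, sg r c h5 h6 h7 h8,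
        show pvWA cps (x :: l) (r, c) = (pvWA cps l (r, c)).or (pvW1 cps x (r, c)) from rfl]
    cases pvWA cps l (r, c) <;> simp

-- ----- A's down pass, pointwise -----

theorem pvInnerD_spec {h w : Nat} (row col : Int) (ls : List Char) :
    ∀ (s b : Int), b = row + s → 0 ≤ s →
      ((0 ≤ row ∧ 0 ≤ col ∧ col < (w : Int)) ∨ (h : Int) ≤ row) →
      ∀ S, pvDims S h w →
        pvDims ((PySem.List.enumerate ls s).foldl (pvDownInner (h : Int) row col) S) h w ∧
        ∀ r c : Int, 0 ≤ r → r < (h : Int) → 0 ≤ c → c < (w : Int) →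
          pvGet2 ((PySem.List.enumerate ls s).foldl (pvDownInner (h : Int) row col) S) r c =
            match pvDW b col ls (r, c) with
            | some l => if pvGet2 S r c = "" ∨ pvGet2 S r c = l then l else pvGet2 S r c
            | none => pvGet2 S r c := by
  induction ls with
  | nil =>
    intro s b hb hs hbd S hS
    refine ⟨by simpa only [PySem.List.enumerate_nil, List.foldl_nil] using hS, ?_⟩
    intro r c h5 h6 h7 h8
    simp only [PySem.List.enumerate_nil, List.foldl_nil, pvDW_nil]
  | cons ch t ih =>
    intro s b hb hs hbd S hS
    simp only [PySem.List.enumerate_cons, List.foldl_cons]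
    have hstep : pvDownInner (h : Int) row col S (s, ch) =
        if b < (h : Int) then
          (if pvGet2 S b col = "" ∨ pvGet2 S b col = String.singleton ch then
            pvSet2 S b col (String.singleton ch) else S)
        else S := by
      simp only [pvDownInner]
      rw [show row + (s, ch).1 = b by simp; omega]
    by_cases hg : b < (h : Int)
    · have hbL : 0 ≤ row ∧ 0 ≤ col ∧ col < (w : Int) := by
        rcases hbd with hbd | hbd
        · exact hbd
        · omega
      obtain ⟨hr0, hc0, hcw⟩ := hbL
      have hb0 : 0 ≤ b := by omega
      rw [hstep, if_pos hg]
      set S1 := if pvGet2 S b col = "" ∨ pvGet2 S b col = String.singleton ch then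
          pvSet2 S b col (String.singleton ch) else S with hS1
      have hS1d : pvDims S1 h w := by
        rw [hS1]; split
        · exact pvDims_pvSet2 hS b col hb0 _
        · exact hS
      have hS1g : ∀ r c : Int, 0 ≤ r → r < (h : Int) → 0 ≤ c → c < (w : Int) →
          pvGet2 S1 r c = if b = r ∧ col = c then
            (if pvGet2 S r c = "" ∨ pvGet2 S r c = String.singleton ch then String.singleton ch
             else pvGet2 S r c)
          else pvGet2 S r c := by
        intro r c h5 h6 h7 h8
        rw [hS1]
        by_cases hk : b = r ∧ col = c
        · obtain ⟨hk1, hk2⟩ := hk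
          subst hk1; subst hk2
          rw [if_pos (⟨rfl, rfl⟩ : b = b ∧ col = col)]
          split_ifs with hcond
          · rw [pvGet2_pvSet2 hS _ hb0 hg hc0 hcw h5 h6 h7 h8, if_pos ⟨rfl, rfl⟩]
          · rfl
        · rw [if_neg hk]
          split_ifs with hcond
          · rw [pvGet2_pvSet2 hS _ hb0 hg hc0 hcw h5 h6 h7 h8, if_neg hk]
          · rfl
      obtain ⟨ihd, ihg⟩ := ih (s+1) (b+1) (by omega) (by omega) hbd S1 hS1d
      refine ⟨ihd, ?_⟩
      intro r c h5 h6 h7 h8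
      rw [ihg r c h5 h6 h7 h8, pvDW_cons, hS1g r c h5 h6 h7 h8]
      by_cases hk : c = col ∧ r = b
      · have hnone : pvDW (b+1) col t (r, c) = none := by
          unfold pvDW; rw [if_neg]; rintro ⟨-, h1, -⟩; simp at h1; omega
        rw [hnone]
        rw [if_pos (show (r, c).2 = col ∧ (r, c).1 = b by simpa using hk)]
        rw [if_pos (show b = r ∧ col = c from ⟨hk.2.symm, hk.1.symm⟩)]
      · have hk1 : ¬((r, c).2 = col ∧ (r, c).1 = b) := by simpa using hk
        have hk2 : ¬(b = r ∧ col = c) := fun ⟨a1, a2⟩ => hk ⟨a2.symm, a1.symm⟩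
        rw [if_neg hk1, if_neg hk2]
    · rw [hstep, if_neg hg]
      obtain ⟨ihd, ihg⟩ := ih (s+1) (b+1) (by omega) (by omega) hbd S hS
      refine ⟨ihd, ?_⟩
      intro r c h5 h6 h7 h8
      rw [ihg r c h5 h6 h7 h8, pvDW_cons]
      have hk1 : ¬((r, c).2 = col ∧ (r, c).1 = b) := by
        rintro ⟨-, h1⟩; simp at h1; omega
      rw [if_neg hk1]

theorem pvDownStep_spec {h w : Nat} (cps : List (Int × List (String × Int))) (p : Int × String)
    (hp : pvPreClue cps (h : Int) (w : Int) false p = true) :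
    ∀ S, pvDims S h w →
      pvDims (pvDownStep cps (h : Int) S p) h w ∧
      ∀ r c : Int, 0 ≤ r → r < (h : Int) → 0 ≤ c → c < (w : Int) →
        pvGet2 (pvDownStep cps (h : Int) S p) r c =
          match pvW1D cps p (r, c) with
          | some l => if pvGet2 S r c = "" ∨ pvGet2 S r c = l then l else pvGet2 S r c
          | none => pvGet2 S r c := by
  intro S hS
  unfold pvDownStep pvW1D
  unfold pvPreClue at hp
  cases hA : (PySem.Dict.mk cps).get? p.1 with
  | none =>
    simp only [hA]
    exact ⟨hS, by intros; trivial⟩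
  | some pos =>
    simp only [hA] at hp
    cases hR : (PySem.Dict.mk pos).get? "row" with
    | none =>
      cases hC : (PySem.Dict.mk pos).get? "col" with
      | none => simp [hR, hC] at hp
      | some c0 => simp [hR, hC] at hp
    | some r0 =>
    cases hC : (PySem.Dict.mk pos).get? "col" with
    | none => simp [hR, hC] at hp
    | some c0 =>
    simp only [hR, hC] at hp
    simp only [hR, hC, Option.getD_some]
    by_cases hemp : p.2 = ""
    · rw [hemp]
      simp only [String.toList_empty, PySem.List.enumerate_nil, List.foldl_nil]
      refine ⟨hS, ?_⟩
      intro r c h5 h6 h7 h8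
      rw [pvDW_nil]
    · have hb : (0 ≤ r0 ∧ 0 ≤ c0 ∧ c0 < (w : Int)) ∨ (h : Int) ≤ r0 := by
        simp [hemp] at hp
        tauto
      exact pvInnerD_spec r0 c0 p.2.toList 0 r0 (by omega) le_rfl hb S hS

theorem pvDownPass_spec {h w : Nat} (cps : List (Int × List (String × Int))) (da : List (Int × String))
    (hpre : ∀ p ∈ da, pvPreClue cps (h : Int) (w : Int) false p = true) :
    ∀ S, pvDims S h w →
      pvDims (da.foldl (pvDownStep cps (h : Int)) S) h w ∧
      ∀ r c : Int, 0 ≤ r → r < (h : Int) → 0 ≤ c → c < (w : Int) →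
        pvGet2 (da.foldl (pvDownStep cps (h : Int)) S) r c =
          if pvGet2 S r c = "" then (pvWD cps da (r, c)).getD "" else pvGet2 S r c := by
  revert hpre
  induction da with
  | nil =>
    intro _ S hS
    refine ⟨hS, ?_⟩
    intro r c h5 h6 h7 h8
    show pvGet2 S r c = if pvGet2 S r c = "" then (none : Option String).getD "" else pvGet2 S r c
    split_ifs with hy
    · exact hy
    · rfl
  | cons x l ih =>
    intro hpre S hS
    obtain ⟨sd, sg⟩ := pvDownStep_spec cps x (hpre x (by simp)) S hS
    obtain ⟨id2, ig⟩ := ih (fun p hp => hpre p (by simp [hp])) _ sd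
    refine ⟨id2, ?_⟩
    intro r c h5 h6 h7 h8
    simp only [List.foldl_cons]
    rw [ig r c h5 h6 h7 h8, sg r c h5 h6 h7 h8,
        show pvWD cps (x :: l) (r, c) = (pvW1D cps x (r, c)).or (pvWD cps l (r, c)) from rfl]
    cases hx : pvW1D cps x (r, c) with
    | none =>
      have hv : (match (none : Option String) with
          | some l => if pvGet2 S r c = "" ∨ pvGet2 S r c = l then l else pvGet2 S r c
          | none => pvGet2 S r c) = pvGet2 S r c := rfl
      rw [hv, Option.none_or]
    | some lx =>
      have hlx : lx ≠ "" := pvW1D_ne_empty hx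
      have hv : (match (some lx : Option String) with
          | some l => if pvGet2 S r c = "" ∨ pvGet2 S r c = l then l else pvGet2 S r c
          | none => pvGet2 S r c) =
          if pvGet2 S r c = "" ∨ pvGet2 S r c = lx then lx else pvGet2 S r c := rfl
      rw [hv]
      by_cases hs0 : pvGet2 S r c = ""
      · rw [if_pos (Or.inl hs0), if_neg hlx, if_pos hs0]
        simp
      · by_cases hsl : pvGet2 S r c = lx
        · rw [if_pos (Or.inr hsl), if_neg hlx, if_neg hs0]
          exact hsl.symm
        · rw [if_neg (not_or.mpr ⟨hs0, hsl⟩), if_neg hs0, if_neg hs0]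

-- ----- B's dictionaries, pointwise -----

theorem pvBInnerA_spec {w : Nat} (row col : Int) (ls : List Char) :
    ∀ (s b : Int), b = col + s →
      ∀ (d : PySem.Dict (Int × Int) String) (k : Int × Int), k.2 < (w : Int) →
        ((PySem.List.enumerate ls s).foldl (pvBAcrossInner (w : Int) row col) d).get? k =
          (pvAW row b ls k).or (d.get? k) := by
  induction ls with
  | nil =>
    intro s b hb d k hk
    simp only [PySem.List.enumerate_nil, List.foldl_nil, pvAW_nil, Option.none_or]
  | cons ch t ih =>
    intro s b hb d k hk
    simp only [PySem.List.enumerate_cons, List.foldl_cons]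
    have hstep : pvBAcrossInner (w : Int) row col d (s, ch) =
        if b < (w : Int) then d.insert (row, b) (String.singleton ch) else d := by
      simp only [pvBAcrossInner]
      rw [show col + (s, ch).1 = b by simp; omega]
    rw [hstep, pvAW_cons]
    by_cases hkh : k.1 = row ∧ k.2 = b
    · have hkeq : k = (row, b) := Prod.ext_iff.mpr ⟨hkh.1, hkh.2⟩
      have hg : b < (w : Int) := by rw [← hkh.2]; exact hk
      rw [if_pos hg, if_pos hkh, ih (s+1) (b+1) (by omega) _ k hk]
      have hnone : pvAW row (b+1) t k = none := by
        unfold pvAW; rw [if_neg]; rintro ⟨-, h1, -⟩; omega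
      rw [hnone, hkeq, PySem.Dict.get?_insert_self]
      simp
    · rw [if_neg hkh]
      by_cases hg : b < (w : Int)
      · rw [if_pos hg, ih (s+1) (b+1) (by omega) _ k hk,
            PySem.Dict.get?_insert_of_ne _ _ (fun he => hkh (by rw [he]; exact ⟨rfl, rfl⟩))]
      · rw [if_neg hg, ih (s+1) (b+1) (by omega) _ k hk]

theorem pvBAcrossDict_spec {w : Nat} (cps : List (Int × List (String × Int))) (aa : List (Int × String)) :
    ∀ (d : PySem.Dict (Int × Int) String) (k : Int × Int), k.2 < (w : Int) →
      (aa.foldl (pvBAcrossStep cps (w : Int)) d).get? k = (pvWA cps aa k).or (d.get? k) := by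
  induction aa with
  | nil =>
    intro d k hk
    show d.get? k = (none : Option String).or (d.get? k)
    simp
  | cons x l ih =>
    intro d k hk
    simp only [List.foldl_cons]
    rw [ih _ k hk]
    have hstep : (pvBAcrossStep cps (w : Int) d x).get? k = (pvW1 cps x k).or (d.get? k) := by
      unfold pvBAcrossStep pvW1
      cases hA : (PySem.Dict.mk cps).get? x.1 with
      | none => simp
      | some pos => exact pvBInnerA_spec _ _ _ 0 _ (by omega) d k hk
    rw [hstep,
        show pvWA cps (x :: l) k = (pvWA cps l k).or (pvW1 cps x k) from rfl,
        Option.or_assoc]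

theorem pvBInnerD_spec {h : Nat} (row col : Int) (ls : List Char) :
    ∀ (s b : Int), b = row + s →
      ∀ (d : PySem.Dict (Int × Int) String) (k : Int × Int), k.1 < (h : Int) →
        ((PySem.List.enumerate ls s).foldl (pvBDownInner (h : Int) row col) d).get? k =
          (d.get? k).or (pvDW b col ls k) := by
  induction ls with
  | nil =>
    intro s b hb d k hk
    simp only [PySem.List.enumerate_nil, List.foldl_nil, pvDW_nil, Option.or_none]
  | cons ch t ih =>
    intro s b hb d k hk
    simp only [PySem.List.enumerate_cons, List.foldl_cons]
    have hstep : pvBDownInner (h : Int) row col d (s, ch) =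
        if b < (h : Int) then d.setdefault (b, col) (String.singleton ch) else d := by
      simp only [pvBDownInner]
      rw [show row + (s, ch).1 = b by simp; omega]
    rw [hstep, pvDW_cons]
    by_cases hkh : k.2 = col ∧ k.1 = b
    · have hkeq : k = (b, col) := Prod.ext_iff.mpr ⟨hkh.2, hkh.1⟩
      have hg : b < (h : Int) := by rw [← hkh.2]; exact hk
      rw [if_pos hg, if_pos hkh, ih (s+1) (b+1) (by omega) _ k hk]
      have hnone : pvDW (b+1) col t k = none := by
        unfold pvDW; rw [if_neg]; rintro ⟨-, h1, -⟩; omega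
      rw [hnone, Option.or_none, hkeq, PySem.Dict.get?_setdefault_self]
      cases d.get? (b, col) <;> simp
    · rw [if_neg hkh]
      by_cases hg : b < (h : Int)
      · rw [if_pos hg, ih (s+1) (b+1) (by omega) _ k hk,
            PySem.Dict.get?_setdefault_of_ne _ _ (fun he => hkh (by rw [he]; exact ⟨rfl, rfl⟩))]
      · rw [if_neg hg, ih (s+1) (b+1) (by omega) _ k hk]

theorem pvBDownDict_spec {h : Nat} (cps : List (Int × List (String × Int))) (da : List (Int × String)) :
    ∀ (d : PySem.Dict (Int × Int) String) (k : Int × Int), k.1 < (h : Int) →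
      (da.foldl (pvBDownStep cps (h : Int)) d).get? k = (d.get? k).or (pvWD cps da k) := by
  induction da with
  | nil =>
    intro d k hk
    show d.get? k = (d.get? k).or (none : Option String)
    simp
  | cons x l ih =>
    intro d k hk
    simp only [List.foldl_cons]
    rw [ih _ k hk]
    have hstep : (pvBDownStep cps (h : Int) d x).get? k = (d.get? k).or (pvW1D cps x k) := by
      unfold pvBDownStep pvW1D
      cases hA : (PySem.Dict.mk cps).get? x.1 with
      | none => simp
      | some pos => exact pvBInnerD_spec _ _ _ 0 _ (by omega) d k hk
    rw [hstep, Option.or_assoc,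
        show pvWD cps (x :: l) k = (pvW1D cps x k).or (pvWD cps l k) from rfl]

-- ----- assembly -----

theorem pvDims_eq_map {sol : List (List String)} {h w : Nat} (hd : pvDims sol h w)
    (f : Nat → Nat → String) (hf : ∀ r c, r < h → c < w → pvGet2 sol (r : Int) (c : Int) = f r c) :
    sol = (List.range h).map fun r => (List.range w).map fun c => f r c := by
  obtain ⟨hl, hrows⟩ := hd
  apply List.ext_getElem (by simp [hl])
  intro i h1 h2
  simp only [List.getElem_map, List.getElem_range]
  have hiw : sol[i].length = w := hrows _ (List.getElem_mem h1)
  apply List.ext_getElem (by simp [hiw])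
  intro j hj1 hj2
  simp only [List.getElem_map, List.getElem_range]
  have hih : i < h := by omega
  have hjw : j < w := by omega
  have := hf i j hih hjw
  rw [pvGet2_eval _ _ _ (by omega) (by omega)] at this
  simp only [Int.toNat_natCast] at this
  rw [← this]
  simp only [List.getD_eq_getElem?_getD]
  rw [List.getElem?_eq_getElem h1, Option.getD_some, List.getElem?_eq_getElem hj1,
      Option.getD_some]

theorem pvDims_replicate (h w : Nat) : pvDims (List.replicate h (List.replicate w "")) h w := by
  refine ⟨by simp, ?_⟩
  intro row hm
  rw [List.eq_of_mem_replicate hm]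
  simp

theorem pvGet2_replicate (h w : Nat) (r c : Nat) (hr : r < h) (hc : c < w) :
    pvGet2 (List.replicate h (List.replicate w "")) (r : Int) (c : Int) = "" := by
  rw [pvGet2_eval _ _ _ (by omega) (by omega)]
  simp only [Int.toNat_natCast, List.getD_eq_getElem?_getD, List.getElem?_replicate]
  simp [hr, hc]

-- the common cell value both programs compute
def pvCell (grid : List (List String)) (cps : List (Int × List (String × Int)))
    (aa da : List (Int × String)) (r c : Nat) : String :=
  let g0 := if pvGet2 grid (r : Int) (c : Int) = "." then "." else ""
  let v2 := (pvWA cps aa ((r : Int), (c : Int))).getD g0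
  let v3 := if v2 = "" then (pvWD cps da ((r : Int), (c : Int))).getD "" else v2
  if v3 = "" then "X" else v3

-- ===== VERDICT (by name: the statement is the Claim_ definition above) =====
theorem build_solution_grid_spec : Claim_equal_build_solution_grid := by
  unfold Claim_equal_build_solution_grid
  intro grid cps aa da hdom hpre
  obtain ⟨hrag, hpa, hpd⟩ := hpre
  unfold Spec_build_solution_grid build_solution_grid build_solution_grid_alt
  have hwidth : (if grid.length > 0 then (grid.headD []).length else 0) = (grid.headD []).length := by
    cases grid <;> simp
  simp only [hwidth]
  -- abbreviations (h, w are the Nat dimensions)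
  -- A side, pass 1 (black squares)
  have hFb : ∀ S i j, i < grid.length → j < (grid.headD []).length → pvDims S grid.length (grid.headD []).length →
      pvDims ((fun S (i j : Nat) => if pvGet2 grid (i : Int) (j : Int) = "." then pvSet2 S (i : Int) (j : Int) "." else S) S i j) grid.length (grid.headD []).length ∧
      ∀ r c : Nat, r < grid.length → c < (grid.headD []).length →
        pvGet2 ((fun S (i j : Nat) => if pvGet2 grid (i : Int) (j : Int) = "." then pvSet2 S (i : Int) (j : Int) "." else S) S i j) (r : Int) (c : Int) =
          if i = r ∧ j = c then (fun (r c : Nat) v => if pvGet2 grid (r : Int) (c : Int) = "." then "." else v) r c (pvGet2 S (r : Int) (c : Int)) else pvGet2 S (r : Int) (c : Int) := by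
    intro S i j hi hj hS
    constructor
    · dsimp only
      split_ifs
      · exact pvDims_pvSet2 hS _ _ (by omega) _
      · exact hS
    · intro r c hr hc
      dsimp only
      by_cases hij : i = r ∧ j = c
      · obtain ⟨rfl, rfl⟩ := hij
        rw [if_pos (⟨rfl, rfl⟩ : i = i ∧ j = j)]
        split_ifs with hdot
        · rw [pvGet2_pvSet2 hS _ (by omega) (by exact_mod_cast hi) (by omega) (by exact_mod_cast hj)
              (by omega) (by exact_mod_cast hi) (by omega) (by exact_mod_cast hj), if_pos (⟨rfl, rfl⟩ : (i : Int) = (i : Int) ∧ (j : Int) = (j : Int))]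
        · rfl
      · rw [if_neg hij]
        split_ifs with hdot
        · rw [pvGet2_pvSet2 hS _ (by omega) (by exact_mod_cast hi) (by omega) (by exact_mod_cast hj)
              (by omega) (by exact_mod_cast hr) (by omega) (by exact_mod_cast hc)]
          rw [if_neg (by rintro ⟨a1, a2⟩; exact hij ⟨by exact_mod_cast a1, by exact_mod_cast a2⟩)]
        · rfl
  obtain ⟨d1, g1⟩ := pvSweep
    (fun S (i j : Nat) => if pvGet2 grid (i : Int) (j : Int) = "." then pvSet2 S (i : Int) (j : Int) "." else S)
    (fun (r c : Nat) v => if pvGet2 grid (r : Int) (c : Int) = "." then "." else v) hFb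
    (List.replicate grid.length (List.replicate (grid.headD []).length ""))
    (pvDims_replicate grid.length (grid.headD []).length)
  -- A side, passes 2 and 3
  obtain ⟨d2, g2⟩ := pvAcrossPass_spec cps aa hpa _ d1
  obtain ⟨d3, g3⟩ := pvDownPass_spec cps da hpd _ d2
  -- A side, pass 4 (fill X)
  have hFx : ∀ S i j, i < grid.length → j < (grid.headD []).length → pvDims S grid.length (grid.headD []).length →
      pvDims ((fun S (i j : Nat) => if pvGet2 S (i : Int) (j : Int) = "" then pvSet2 S (i : Int) (j : Int) "X" else S) S i j) grid.length (grid.headD []).length ∧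
      ∀ r c : Nat, r < grid.length → c < (grid.headD []).length →
        pvGet2 ((fun S (i j : Nat) => if pvGet2 S (i : Int) (j : Int) = "" then pvSet2 S (i : Int) (j : Int) "X" else S) S i j) (r : Int) (c : Int) =
          if i = r ∧ j = c then (fun (_ _ : Nat) v => if v = "" then "X" else v) r c (pvGet2 S (r : Int) (c : Int)) else pvGet2 S (r : Int) (c : Int) := by
    intro S i j hi hj hS
    constructor
    · dsimp only
      split_ifs
      · exact pvDims_pvSet2 hS _ _ (by omega) _
      · exact hS
    · intro r c hr hc
      dsimp only
      by_cases hij : i = r ∧ j = c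
      · obtain ⟨rfl, rfl⟩ := hij
        rw [if_pos (⟨rfl, rfl⟩ : i = i ∧ j = j)]
        split_ifs with hdot
        · rw [pvGet2_pvSet2 hS _ (by omega) (by exact_mod_cast hi) (by omega) (by exact_mod_cast hj)
              (by omega) (by exact_mod_cast hi) (by omega) (by exact_mod_cast hj), if_pos (⟨rfl, rfl⟩ : (i : Int) = (i : Int) ∧ (j : Int) = (j : Int))]
        · rfl
      · rw [if_neg hij]
        split_ifs with hdot
        · rw [pvGet2_pvSet2 hS _ (by omega) (by exact_mod_cast hi) (by omega) (by exact_mod_cast hj)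
              (by omega) (by exact_mod_cast hr) (by omega) (by exact_mod_cast hc)]
          rw [if_neg (by rintro ⟨a1, a2⟩; exact hij ⟨by exact_mod_cast a1, by exact_mod_cast a2⟩)]
        · rfl
  obtain ⟨d4, g4⟩ := pvSweep
    (fun S (i j : Nat) => if pvGet2 S (i : Int) (j : Int) = "" then pvSet2 S (i : Int) (j : Int) "X" else S)
    (fun (_ _ : Nat) v => if v = "" then "X" else v) hFx _ d3
  -- the A result is the cell-value table
  have hA := pvDims_eq_map d4 (pvCell grid cps aa da) (by
    intro r c hr hc
    rw [g4 r c hr hc]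
    rw [g3 (r : Int) (c : Int) (by omega) (by exact_mod_cast hr) (by omega) (by exact_mod_cast hc)]
    rw [g2 (r : Int) (c : Int) (by omega) (by exact_mod_cast hr) (by omega) (by exact_mod_cast hc)]
    rw [g1 r c hr hc]
    rw [pvGet2_replicate grid.length (grid.headD []).length r c hr hc]
    rfl)
  -- the B result is the same table
  refine hA.trans ?_
  symm
  refine List.map_congr_left ?_
  intro r hrm
  have hr : r < grid.length := List.mem_range.mp hrm
  refine List.map_congr_left ?_
  intro c hcm
  have hc : c < (grid.headD []).length := List.mem_range.mp hcm
  have ha : (aa.foldl (pvBAcrossStep cps ((grid.headD []).length : Int)) PySem.Dict.empty).get? ((r : Int), (c : Int)) =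
      pvWA cps aa ((r : Int), (c : Int)) := by
    rw [pvBAcrossDict_spec cps aa _ _ (show ((r : Int), (c : Int)).2 < ((grid.headD []).length : Int) by simpa using hc)]
    simp
  have hd : (da.foldl (pvBDownStep cps (grid.length : Int)) PySem.Dict.empty).get? ((r : Int), (c : Int)) =
      pvWD cps da ((r : Int), (c : Int)) := by
    rw [pvBDownDict_spec cps da _ _ (show ((r : Int), (c : Int)).1 < (grid.length : Int) by simpa using hr)]
    simp
  have hg : (grid.getD r []).getD c "" = pvGet2 grid (r : Int) (c : Int) := by
    rw [pvGet2_eval _ _ _ (by omega) (by omega)]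
    simp
  simp only [ha, hd, hg, pvCell]
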